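-- pv_equiv track=rewrite | github.com/skarwa4491/Python-DSA | Level Up/arrays and strings/smallest_negative_number.py | smallestNegativeBalance
-- ===== SOURCE A (Python) =====
-- def smallestNegativeBalance(debts):
--
--     # Write your code here
--     borrower_map = {}
--     lender_map = {}
--     for txn in debts:
--         if(borrower_map.get(txn[0])):
--             borrower_map.update(
--                 {txn[0]: int(borrower_map.get(txn[0]))+int(txn[2])})
--         else:
--             borrower_map.update({txn[0]: int(txn[2])})
--         if(lender_map.get(txn[1])):
--             lender_map.update(
--                 {txn[1]: int(lender_map.get(txn[1]))+int(txn[2])})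
--         else:
--             lender_map.update({txn[1]: int(txn[2])})
--
--     result = []
--     for person, value in borrower_map.items():
--         if person in lender_map.keys() and person in borrower_map.keys():
--             value = lender_map[person]-borrower_map[person]
--         elif person in lender_map.keys():
--             value = lender_map[person]
--         elif person in borrower_map.keys():
--             value = borrower_map[person]*-1
--
--         if value < 0:
--             result.append(person)
--     return result
-- ===== SOURCE B (Python) =====
-- def smallestNegativeBalance(debts):
--     borrowers = []
--     for txn in debts:
--         if txn[0] not in borrowers:
--             borrowers.append(txn[0])
--     result = []
--     for p in borrowers:
--         lent = sum(t[2] for t in debts if t[1] == p)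
--         borrowed = sum(t[2] for t in debts if t[0] == p)
--         if lent - borrowed < 0:
--             result.append(p)
--     return result
-- ===== Notes on version B (the rewrite author's own statement) =====
-- stated objective: alternative
-- what changed: B drops A's two accumulator dicts and reconciliation branch entirely: it first collects distinct borrowers in first-appearance order, then for each such person recomputes lent and borrowed totals by scanning the transaction list, keeping those with lent - borrowed < 0 (per-person rescans instead of dict accumulation).
import Mathlib
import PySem

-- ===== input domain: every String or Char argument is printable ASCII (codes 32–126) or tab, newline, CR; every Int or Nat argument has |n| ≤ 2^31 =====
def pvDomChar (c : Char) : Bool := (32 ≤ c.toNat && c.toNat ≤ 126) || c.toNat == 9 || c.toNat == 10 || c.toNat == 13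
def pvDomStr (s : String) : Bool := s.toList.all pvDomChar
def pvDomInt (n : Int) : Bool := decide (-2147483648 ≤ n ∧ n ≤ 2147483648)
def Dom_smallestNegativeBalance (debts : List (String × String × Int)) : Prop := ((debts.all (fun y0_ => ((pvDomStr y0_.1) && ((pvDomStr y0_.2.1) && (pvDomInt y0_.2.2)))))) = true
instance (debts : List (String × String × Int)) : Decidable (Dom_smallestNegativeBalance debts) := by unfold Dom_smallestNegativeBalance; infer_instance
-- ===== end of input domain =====

-- B drops A's two accumulator dicts and reconciliation branch: it lists distinct borrowers in
-- first-appearance order, then rescans the transactions per person for lent/borrowed totals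
-- (objective: alternative algorithm, same asymptotic cost).

-- ===== PORT A =====
-- A's repeated update pattern: if d.get(k) is truthy add, else set (Python truthiness: None or 0 is falsy)
def pvTally (d : PySem.Dict String Int) (k : String) (a : Int) : PySem.Dict String Int :=
  match d.get? k with
  | some v => if v ≠ 0 then d.insert k (v + a) else d.insert k a
  | none => d.insert k a

-- one loop iteration of A: update borrower_map and lender_map
def pvStepA (ms : PySem.Dict String Int × PySem.Dict String Int) (txn : String × String × Int) :
    PySem.Dict String Int × PySem.Dict String Int :=
  (pvTally ms.1 txn.1 txn.2.2, pvTally ms.2 txn.2.1 txn.2.2)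

def smallestNegativeBalance (debts : List (String × String × Int)) : List String :=
  let maps := debts.foldl pvStepA (PySem.Dict.empty, PySem.Dict.empty)
  let bm := maps.1
  let lm := maps.2
  bm.items.foldl (fun result pv =>
    let person := pv.1
    let value :=
      if lm.contains person && bm.contains person then lm.getD person 0 - bm.getD person 0
      else if lm.contains person then lm.getD person 0
      else if bm.contains person then bm.getD person 0 * (-1)
      else pv.2
    if value < 0 then result ++ [person] else result) []

-- ===== PORT B =====
-- sum(t[2] for t in debts if t[1] == p)
def pvLent (debts : List (String × String × Int)) (p : String) : Int :=
  ((debts.filter (fun t => t.2.1 = p)).map (fun t => t.2.2)).sum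

-- sum(t[2] for t in debts if t[0] == p)
def pvBorrowed (debts : List (String × String × Int)) (p : String) : Int :=
  ((debts.filter (fun t => t.1 = p)).map (fun t => t.2.2)).sum

def smallestNegativeBalance_alt (debts : List (String × String × Int)) : List String :=
  let borrowers := debts.foldl (fun acc txn => if txn.1 ∈ acc then acc else acc ++ [txn.1]) []
  borrowers.foldl (fun result p =>
    if pvLent debts p - pvBorrowed debts p < 0 then result ++ [p] else result) []

-- ===== PRECONDITION & SPEC =====
def Spec_smallestNegativeBalance (debts : List (String × String × Int)) (out : List String) : Prop := out = smallestNegativeBalance_alt debts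
instance (debts : List (String × String × Int)) (out : List String) : Decidable (Spec_smallestNegativeBalance debts out) := by unfold Spec_smallestNegativeBalance; infer_instance

-- ===== CLAIM (what is proved, stated in full; the proofs are below) =====
def Claim_equal_smallestNegativeBalance : Prop := ∀ (debts : List (String × String × Int)), Dom_smallestNegativeBalance debts → Spec_smallestNegativeBalance debts (smallestNegativeBalance debts)

-- ===== LEMMAS AND PROOFS =====

-- A's borrower/lender update, despite the truthiness branch, is a plain accumulate-into-the-dict step
theorem pvTally_eq (d : PySem.Dict String Int) (k : String) (a : Int) :
    pvTally d k a = d.insert k (d.getD k 0 + a) := by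
  unfold pvTally
  rcases h : d.get? k with _ | v
  · simp [PySem.Dict.getD_of_get?_eq_none d 0 h]
  · rw [PySem.Dict.getD_of_get?_eq_some d 0 h]
    by_cases hv : v = 0 <;> simp [hv]

theorem pvStepA_eq (ms : PySem.Dict String Int × PySem.Dict String Int)
    (txn : String × String × Int) :
    pvStepA ms txn =
      (ms.1.insert txn.1 (ms.1.getD txn.1 0 + txn.2.2),
       ms.2.insert txn.2.1 (ms.2.getD txn.2.1 0 + txn.2.2)) := by
  simp [pvStepA, pvTally_eq]

theorem pvBorrowed_cons (t : String × String × Int) (rest : List (String × String × Int))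
    (p : String) :
    pvBorrowed (t :: rest) p = (if t.1 = p then t.2.2 else 0) + pvBorrowed rest p := by
  by_cases h : t.1 = p <;> simp [pvBorrowed, h]

theorem pvLent_cons (t : String × String × Int) (rest : List (String × String × Int))
    (p : String) :
    pvLent (t :: rest) p = (if t.2.1 = p then t.2.2 else 0) + pvLent rest p := by
  by_cases h : t.2.1 = p <;> simp [pvLent, h]

-- A's borrower_map after the loop: value at p is start value plus the borrowed total of the rest
theorem bm_getD (debts : List (String × String × Int)) :
    ∀ bm lm p, ((debts.foldl pvStepA (bm, lm)).1).getD p 0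
      = bm.getD p 0 + pvBorrowed debts p := by
  induction debts with
  | nil => intro bm lm p; simp [pvBorrowed]
  | cons t rest ih =>
    intro bm lm p
    rw [List.foldl_cons, pvStepA_eq]
    rw [ih, pvBorrowed_cons, PySem.Dict.getD_insert]
    by_cases h : t.1 = p
    · simp only [h]; split_ifs <;> ring
    · rw [if_neg (fun hh => h hh.symm), if_neg h]; ring

-- A's lender_map after the loop
theorem lm_getD (debts : List (String × String × Int)) :
    ∀ bm lm p, ((debts.foldl pvStepA (bm, lm)).2).getD p 0
      = lm.getD p 0 + pvLent debts p := by
  induction debts with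
  | nil => intro bm lm p; simp [pvLent]
  | cons t rest ih =>
    intro bm lm p
    rw [List.foldl_cons, pvStepA_eq]
    rw [ih, pvLent_cons, PySem.Dict.getD_insert]
    by_cases h : t.2.1 = p
    · simp only [h]; split_ifs <;> ring
    · rw [if_neg (fun hh => h hh.symm), if_neg h]; ring

-- A's borrower_map keys = B's first-appearance borrower list
theorem bm_keys (debts : List (String × String × Int)) :
    ∀ bm lm, ((debts.foldl pvStepA (bm, lm)).1).keys
      = debts.foldl (fun acc txn => if txn.1 ∈ acc then acc else acc ++ [txn.1]) bm.keys := by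
  induction debts with
  | nil => intro bm lm; rfl
  | cons t rest ih =>
    intro bm lm
    rw [List.foldl_cons, List.foldl_cons, pvStepA_eq]
    rw [ih]
    congr 1
    by_cases h : bm.contains t.1 = true
    · rw [PySem.Dict.keys_insert_of_contains _ _ h,
        if_pos ((PySem.Dict.contains_iff_mem_keys bm t.1).mp h)]
    · rw [PySem.Dict.keys_insert_of_not_contains _ _ (by simpa using h),
        if_neg (fun hm => h ((PySem.Dict.contains_iff_mem_keys bm t.1).mpr hm))]

-- A's reconciliation fold over bm.items equals the filter of bm.keys by negative net balance
theorem pvFinal (bm lm : PySem.Dict String Int) :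
    bm.items.foldl (fun result pv =>
      if (if lm.contains pv.1 && bm.contains pv.1 then lm.getD pv.1 0 - bm.getD pv.1 0
          else if lm.contains pv.1 then lm.getD pv.1 0
          else if bm.contains pv.1 then bm.getD pv.1 0 * (-1)
          else pv.2) < 0 then result ++ [pv.1] else result) []
      = bm.keys.filter (fun p => lm.getD p 0 - bm.getD p 0 < 0) := by
  have h := PySem.List.foldl_append_if
    (fun pv : String × Int =>
      decide ((if lm.contains pv.1 && bm.contains pv.1 then lm.getD pv.1 0 - bm.getD pv.1 0
        else if lm.contains pv.1 then lm.getD pv.1 0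
        else if bm.contains pv.1 then bm.getD pv.1 0 * (-1)
        else pv.2) < 0))
    (fun pv : String × Int => pv.1) bm.items []
  simp only [decide_eq_true_eq, List.nil_append] at h
  rw [h]
  have hfc : bm.items.filter
        (fun pv : String × Int =>
          decide ((if lm.contains pv.1 && bm.contains pv.1 then lm.getD pv.1 0 - bm.getD pv.1 0
            else if lm.contains pv.1 then lm.getD pv.1 0
            else if bm.contains pv.1 then bm.getD pv.1 0 * (-1)
            else pv.2) < 0))
      = bm.items.filter (fun pv : String × Int => decide (lm.getD pv.1 0 - bm.getD pv.1 0 < 0)) := by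
    apply List.filter_congr
    intro pv hpv
    have hc : bm.contains pv.1 = true :=
      (PySem.Dict.contains_iff_mem_keys bm pv.1).mpr (PySem.Dict.mem_keys_of_mem_items bm hpv)
    by_cases hl : lm.contains pv.1 = true
    · simp [hc, hl]
    · have hl0 : lm.getD pv.1 0 = 0 :=
        PySem.Dict.getD_of_not_contains lm 0 (by simpa using hl)
      simp only [Bool.not_eq_true] at hl
      simp [hc, hl, hl0]
  rw [hfc]
  simp only [PySem.Dict.keys]
  rw [List.filter_map]
  rfl

-- B's result fold is the same filter over the borrower list
theorem pvAltFinal (debts : List (String × String × Int)) (borrowers : List String) :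
    borrowers.foldl (fun result p =>
      if pvLent debts p - pvBorrowed debts p < 0 then result ++ [p] else result) []
      = borrowers.filter (fun p => pvLent debts p - pvBorrowed debts p < 0) := by
  have h := PySem.List.foldl_append_if
    (fun p : String => decide (pvLent debts p - pvBorrowed debts p < 0))
    (fun p : String => p) borrowers []
  simp only [decide_eq_true_eq, List.nil_append] at h
  rw [h, List.map_id']

-- ===== VERDICT (by name: the statement is the Claim_ definition above) =====
theorem smallestNegativeBalance_spec : Claim_equal_smallestNegativeBalance := by
  intro debts _
  unfold Spec_smallestNegativeBalance smallestNegativeBalance smallestNegativeBalance_alt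
  rw [pvFinal, pvAltFinal, bm_keys]
  have hk : (PySem.Dict.empty : PySem.Dict String Int).keys = [] := rfl
  rw [hk]
  apply List.filter_congr
  intro p _
  rw [bm_getD, lm_getD]
  simp [PySem.Dict.getD_empty]
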